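-- pv_equiv track=rewrite | github.com/Rushijaviya/LeetCode-Contest | Biweekly Contest/Biweekly Contest 75/4_Sum of Scores of Built Strings.py | sumScores
-- ===== SOURCE A (Python) =====
-- def sumScores(s):
--     '''
--     # TLE
--     def check(l):
--         ans=0
--         start=0
--         while start<len(l) and start<len(s) and s[start]==l[start]:
--             start+=1
--             ans+=1
--         return ans
--
--     count=0
--     s=list(s)
--     for i in range(len(s)):
--         count+=check(s[len(s)-(i+1):])
--     return count
--     '''
--
--     # Z-function
--     s=list(s)
--     n=len(s)
--     z=[0]*n
--     left=right=0
--     for i in range(1,n):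
--         if i<=right:
--             z[i]=min(z[i-left],right-i+1)
--         while i+z[i]<n and s[z[i]]==s[i+z[i]]:
--             z[i]+=1
--         if i+z[i]-1>right:
--             right=i+z[i]-1
--             left=i
--     return sum(z)+n
-- ===== SOURCE B (Python) =====
-- def sumScores(s):
--     n = len(s)
--     total = 0
--     for i in range(n):
--         j = 0
--         while i + j < n and s[j] == s[i + j]:
--             j += 1
--         total += j
--     return total
-- ===== Notes on version B (the rewrite author's own statement) =====
-- stated objective: simpler
-- what changed: Replaces the Z-function with its left/right window bookkeeping by a direct independent per-suffix scan that counts the longest common prefix of s with each suffix s[i:].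
import Mathlib
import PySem

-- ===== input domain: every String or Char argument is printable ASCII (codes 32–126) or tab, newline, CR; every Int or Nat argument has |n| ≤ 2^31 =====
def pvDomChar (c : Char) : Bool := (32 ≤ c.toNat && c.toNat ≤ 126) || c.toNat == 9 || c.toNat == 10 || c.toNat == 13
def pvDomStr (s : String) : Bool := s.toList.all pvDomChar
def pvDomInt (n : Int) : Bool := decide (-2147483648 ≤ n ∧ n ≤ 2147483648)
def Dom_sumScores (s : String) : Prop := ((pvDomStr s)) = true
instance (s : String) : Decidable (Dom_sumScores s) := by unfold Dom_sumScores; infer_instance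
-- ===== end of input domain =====

-- B replaces A's Z-function (shared left/right window bookkeeping) by a direct
-- independent per-suffix scan of the common prefix with s; objective: simpler.

-- ===== PORT A =====
-- inner while loop of A: `while i+z[i]<n and s[z[i]]==s[i+z[i]]: z[i]+=1`
def zExtend (l : List Char) (i z : Nat) : Nat :=
  if h : i + z < l.length ∧ l.getD z ' ' = l.getD (i + z) ' ' then
    zExtend l i (z + 1)
  else z
termination_by l.length - (i + z)
decreasing_by obtain ⟨h1, -⟩ := h; omega

-- one iteration of A's `for i in range(1,n)` body, state = (z, left, right)
def stepA (l : List Char) (st : List Nat × Nat × Nat) (i : Nat) : List Nat × Nat × Nat :=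
  let z := st.1
  let left := st.2.1
  let right := st.2.2
  -- `if i<=right: z[i]=min(z[i-left],right-i+1)`  (otherwise z[i] stays as stored)
  let z0 := if i ≤ right then min (z.getD (i - left) 0) (right - i + 1) else z.getD i 0
  let zi := zExtend l i z0
  let z' := z.set i zi
  -- `if i+z[i]-1>right: right=i+z[i]-1; left=i`
  if right < i + zi - 1 then (z', i, i + zi - 1) else (z', left, right)

def sumScores (s : String) : Int :=
  let l := s.toList
  let n := l.length
  -- `for i in range(1,n)` = fold over [1, …, n-1]
  let st := (List.range' 1 (n - 1)).foldl (stepA l) (List.replicate n 0, 0, 0)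
  Int.ofNat (st.1.foldl (· + ·) 0 + n)

-- ===== PORT B =====
-- B's inner while loop: `while i+j<n and s[j]==s[i+j]: j+=1`
def lcpScan (l : List Char) (i j : Nat) : Nat :=
  if h : i + j < l.length ∧ l.getD j ' ' = l.getD (i + j) ' ' then
    lcpScan l i (j + 1)
  else j
termination_by l.length - (i + j)
decreasing_by obtain ⟨h1, -⟩ := h; omega

def sumScores_alt (s : String) : Int :=
  let l := s.toList
  Int.ofNat ((List.range l.length).foldl (fun t i => t + lcpScan l i 0) 0)

-- ===== PRECONDITION & SPEC =====
def Spec_sumScores (s : String) (out : Int) : Prop := out = sumScores_alt s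
instance (s : String) (out : Int) : Decidable (Spec_sumScores s out) := by unfold Spec_sumScores; infer_instance

-- ===== CLAIM (what is proved, stated in full; the proofs are below) =====
def Claim_equal_sumScores : Prop := ∀ (s : String), Dom_sumScores s → Spec_sumScores s (sumScores s)

-- ===== LEMMAS AND PROOFS =====

-- length of the longest common prefix (the specification both ports meet)
def lcp : List Char → List Char → Nat
  | a :: as, b :: bs => if a = b then lcp as bs + 1 else 0
  | _, _ => 0

lemma lcp_le_right : ∀ (a b : List Char), lcp a b ≤ b.length := by
  intro a
  induction a with
  | nil => intro b; cases b <;> simp [lcp]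
  | cons x xs ih =>
    intro b
    cases b with
    | nil => simp [lcp]
    | cons y ys =>
      simp only [lcp]
      split
      · simpa using ih ys
      · simp

lemma lcp_self : ∀ (a : List Char), lcp a a = a.length := by
  intro a
  induction a with
  | nil => simp [lcp]
  | cons x xs ih => simp [lcp, ih]

lemma lcp_getD_eq (d : Char) :
    ∀ (a b : List Char) (k : Nat), k < lcp a b → a.getD k d = b.getD k d := by
  intro a
  induction a with
  | nil => intro b k h; cases b <;> simp [lcp] at h
  | cons x xs ih =>
    intro b k h
    cases b with
    | nil => simp [lcp] at h
    | cons y ys =>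
      simp only [lcp] at h
      by_cases hxy : x = y
      · subst hxy
        rw [if_pos rfl] at h
        cases k with
        | zero => simp
        | succ k => simpa [List.getD] using ih ys k (by omega)
      · simp [hxy] at h

lemma lcp_mismatch (d : Char) :
    ∀ (a b : List Char), lcp a b < a.length → lcp a b < b.length →
      a.getD (lcp a b) d ≠ b.getD (lcp a b) d := by
  intro a
  induction a with
  | nil => intro b h _; simp at h
  | cons x xs ih =>
    intro b h1 h2
    cases b with
    | nil => simp at h2
    | cons y ys =>
      simp only [lcp] at *
      by_cases hxy : x = y
      · subst hxy
        rw [if_pos rfl] at h1 h2 ⊢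
        simp only [List.length_cons] at h1 h2
        simpa [List.getD] using ih ys (by omega) (by omega)
      · rw [if_neg hxy] at h1 h2 ⊢
        simpa [List.getD] using hxy

lemma le_lcp (d : Char) :
    ∀ (a b : List Char) (z : Nat), z ≤ a.length → z ≤ b.length →
      (∀ k, k < z → a.getD k d = b.getD k d) → z ≤ lcp a b := by
  intro a
  induction a with
  | nil =>
    intro b z h _ _
    have hz : z = 0 := by simpa using h
    simp [hz]
  | cons x xs ih =>
    intro b z h1 h2 hk
    cases b with
    | nil =>
      simp only [List.length_nil] at h2
      have : z = 0 := by omega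
      simp [this]
    | cons y ys =>
      cases z with
      | zero => exact Nat.zero_le _
      | succ z =>
        have hxy : x = y := by simpa [List.getD] using hk 0 (by omega)
        subst hxy
        have hstep : lcp (x :: xs) (x :: ys) = lcp xs ys + 1 := by simp [lcp]
        rw [hstep]
        have := ih ys z (by simpa using h1) (by simpa using h2)
          (fun k hk' => by simpa [List.getD] using hk (k + 1) (by omega))
        omega

lemma getD_drop (l : List Char) (i k : Nat) (d : Char) :
    (l.drop i).getD k d = l.getD (i + k) d := by
  simp [List.getD_eq_getElem?_getD, List.getElem?_drop]

-- the while loop computes the LCP with the suffix, provided it starts inside it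
lemma lcpScan_eq (l : List Char) (i : Nat) :
    ∀ j, j ≤ lcp l (l.drop i) → lcpScan l i j = lcp l (l.drop i) := by
  have H : ∀ m j, l.length - (i + j) = m → j ≤ lcp l (l.drop i) →
      lcpScan l i j = lcp l (l.drop i) := by
    intro m
    induction m using Nat.strong_induction_on with
    | _ m ih =>
      intro j hm hj
      have hL2 : lcp l (l.drop i) ≤ l.length - i := by
        have := lcp_le_right l (l.drop i)
        simpa using this
      rw [lcpScan]
      split
      · next h =>
        obtain ⟨h1, h2⟩ := h
        -- j < lcp: otherwise mismatch / out of range contradicts the condition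
        have hlt : j < lcp l (l.drop i) := by
          rcases Nat.lt_or_ge j (lcp l (l.drop i)) with h' | h'
          · exact h'
          · exfalso
            have hj' : j = lcp l (l.drop i) := by omega
            have hne := lcp_mismatch ' ' l (l.drop i) (by omega)
              (by simp; omega)
            rw [← hj', getD_drop] at hne
            exact hne h2
        exact ih (l.length - (i + (j + 1))) (by omega) (j + 1) rfl (by omega)
      · next h =>
        -- condition false: j = lcp
        rcases Nat.lt_or_ge j (lcp l (l.drop i)) with h' | h'
        · exfalso
          apply h
          constructor
          · omega
          · have := lcp_getD_eq ' ' l (l.drop i) j h'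
            rwa [getD_drop] at this
        · omega
  exact fun j => H (l.length - (i + j)) j rfl

lemma zExtend_eq_lcpScan (l : List Char) (i : Nat) :
    ∀ j, zExtend l i j = lcpScan l i j := by
  have H : ∀ m j, l.length - (i + j) = m → zExtend l i j = lcpScan l i j := by
    intro m
    induction m using Nat.strong_induction_on with
    | _ m ih =>
      intro j hm
      rw [zExtend, lcpScan]
      split
      · next h =>
        obtain ⟨h1, -⟩ := h
        exact ih (l.length - (i + (j + 1))) (by omega) (j + 1) rfl
      · rfl
  exact fun j => H (l.length - (i + j)) j rfl

-- invariant of A's main loop after processing i = 1 … m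
def InvA (l : List Char) (m : Nat) (st : List Nat × Nat × Nat) : Prop :=
  st.1.length = l.length ∧
  (∀ j, 1 ≤ j → j ≤ m → st.1.getD j 0 = lcp l (l.drop j)) ∧
  (∀ j, j = 0 ∨ m < j → st.1.getD j 0 = 0) ∧
  ((st.2.1 = 0 ∧ st.2.2 = 0) ∨
    (1 ≤ st.2.1 ∧ st.2.1 ≤ m ∧ st.2.2 < l.length ∧
      st.2.2 + 1 ≤ st.2.1 + lcp l (l.drop st.2.1)))

lemma getD_set (z : List Nat) (i j v : Nat) :
    (z.set i v).getD j 0 = if i = j ∧ i < z.length then v else z.getD j 0 := by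
  simp only [List.getD_eq_getElem?_getD, List.getElem?_set]
  by_cases hij : i = j
  · subst hij
    by_cases hlen : i < z.length <;> simp [hlen]
  · simp [hij]

lemma stepA_inv (l : List Char) (m : Nat) (st : List Nat × Nat × Nat)
    (hInv : InvA l m st) (hi : m + 1 < l.length) :
    InvA l (m + 1) (stepA l st (m + 1)) := by
  obtain ⟨hlen, hz, hz0, hbox⟩ := hInv
  set i := m + 1 with hidef
  set n := l.length with hndef
  obtain ⟨z, left, right⟩ := st
  simp only at hlen hz hz0 hbox
  -- the starting value z0 lies inside the true LCP
  have hz0le : (if i ≤ right then min (z.getD (i - left) 0) (right - i + 1)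
      else z.getD i 0) ≤ lcp l (l.drop i) := by
    split
    · next hir =>
      rcases hbox with ⟨hl0, hr0⟩ | ⟨hl1, hlm, hrn, hbx⟩
      · omega
      · have hKval : z.getD (i - left) 0 = lcp l (l.drop (i - left)) :=
          hz (i - left) (by omega) (by omega)
        set z0 := min (z.getD (i - left) 0) (right - i + 1) with hz0def
        have hK : z0 ≤ lcp l (l.drop (i - left)) := by rw [← hKval]; omega
        apply le_lcp ' '
        · omega
        · simp; omega
        · intro t ht
          have h1 : l.getD t ' ' = l.getD (i - left + t) ' ' := by
            have := lcp_getD_eq ' ' l (l.drop (i - left)) t (by omega)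
            rwa [getD_drop] at this
          have h2 : l.getD (i - left + t) ' ' = l.getD (i + t) ' ' := by
            have hu : i - left + t < lcp l (l.drop left) := by omega
            have := lcp_getD_eq ' ' l (l.drop left) (i - left + t) hu
            rw [getD_drop] at this
            have : l.getD (i - left + t) ' ' = l.getD (left + (i - left + t)) ' ' := this
            rw [this]
            congr 1
            omega
          rw [getD_drop]
          rw [h1, h2]
    · next hir =>
      rw [hz0 i (by omega)]
      exact Nat.zero_le _
  have hLle : lcp l (l.drop i) ≤ n - i := by
    have := lcp_le_right l (l.drop i)
    simpa using this
  -- the while loop then reaches exactly the LCP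
  have hzi : zExtend l i (if i ≤ right then min (z.getD (i - left) 0) (right - i + 1)
      else z.getD i 0) = lcp l (l.drop i) := by
    rw [zExtend_eq_lcpScan]
    exact lcpScan_eq l i _ hz0le
  simp only [stepA]
  rw [hzi]
  set L := lcp l (l.drop i) with hLdef
  have hset : ∀ j, ((z.set i L).getD j 0) =
      if i = j ∧ i < z.length then L else z.getD j 0 := fun j => getD_set z i j L
  have hmain : (z.set i L).length = l.length ∧
      (∀ j, 1 ≤ j → j ≤ m + 1 → (z.set i L).getD j 0 = lcp l (l.drop j)) ∧
      (∀ j, j = 0 ∨ m + 1 < j → (z.set i L).getD j 0 = 0) := by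
    refine ⟨by simpa using hlen, ?_, ?_⟩
    · intro j h1 h2
      rw [hset]
      by_cases hij : i = j
      · rw [if_pos ⟨hij, by omega⟩, ← hij]
      · rw [if_neg (by tauto)]
        exact hz j h1 (by omega)
    · intro j hj
      rw [hset, if_neg (by omega)]
      exact hz0 j (by omega)
  split
  · next hcond =>
    refine ⟨hmain.1, hmain.2.1, hmain.2.2, Or.inr ?_⟩
    dsimp only
    exact ⟨by omega, by omega, by omega, by omega⟩
  · next hcond =>
    refine ⟨hmain.1, hmain.2.1, hmain.2.2, ?_⟩
    dsimp only
    rcases hbox with h | h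
    · exact Or.inl h
    · exact Or.inr ⟨h.1, by omega, h.2.2⟩

lemma loop_inv (l : List Char) :
    ∀ m, m + 1 ≤ l.length →
      InvA l m ((List.range' 1 m).foldl (stepA l) (List.replicate l.length 0, 0, 0)) := by
  intro m
  induction m with
  | zero =>
    intro _
    refine ⟨by simp, by omega, ?_, Or.inl ⟨rfl, rfl⟩⟩
    intro j _
    simp [List.getD_eq_getElem?_getD, List.getElem?_replicate]
    split <;> rfl
  | succ m ih =>
    intro h
    rw [List.range'_concat, List.foldl_append]
    have h11 : 1 + 1 * m = m + 1 := by omega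
    rw [h11]
    simp only [List.foldl_cons, List.foldl_nil]
    exact stepA_inv l m _ (ih (by omega)) (by omega)

lemma foldl_add_nat : ∀ (xs : List Nat) (a : Nat), xs.foldl (· + ·) a = a + xs.sum := by
  intro xs
  induction xs with
  | nil => simp
  | cons x xs ih => intro a; simp [ih]; omega

lemma foldl_add_f (f : Nat → Nat) :
    ∀ (xs : List Nat) (a : Nat), xs.foldl (fun t i => t + f i) a = a + (xs.map f).sum := by
  intro xs
  induction xs with
  | nil => simp
  | cons x xs ih => intro a; simp [ih]; omega

lemma list_eq_map_range (z : List Nat) (f : Nat → Nat)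
    (h : ∀ j, j < z.length → z.getD j 0 = f j) :
    z = (List.range z.length).map f := by
  apply List.ext_getElem
  · simp
  · intro j h1 h2
    have := h j h1
    rw [List.getD_eq_getElem?_getD, List.getElem?_eq_getElem h1] at this
    simpa using this

-- ===== VERDICT (by name: the statement is the Claim_ definition above) =====
theorem sumScores_spec : Claim_equal_sumScores := by
  intro s _
  unfold Spec_sumScores sumScores sumScores_alt
  dsimp only
  set l := s.toList with hldef
  set n := l.length with hndef
  -- B's side: sum of the true LCPs over all i
  have hB : (List.range n).foldl (fun t i => t + lcpScan l i 0) 0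
      = ((List.range n).map (fun i => lcp l (l.drop i))).sum := by
    rw [foldl_add_f]
    simp only [Nat.zero_add]
    congr 1
    apply List.map_congr_left
    intro i _
    exact lcpScan_eq l i 0 (Nat.zero_le _)
  rw [hB]
  cases Nat.eq_zero_or_pos n with
  | inl h0 =>
    simp [h0]
  | inr hpos =>
    -- A's side: the final z list is exactly the LCPs at 1 … n-1, with z[0] = 0
    have hInv := loop_inv l (n - 1) (by omega)
    set st := (List.range' 1 (n - 1)).foldl (stepA l) (List.replicate l.length 0, 0, 0)
      with hstdef
    obtain ⟨hlen, hz, hz0, -⟩ := hInv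
    have hzform : st.1 = (List.range n).map
        (fun j => if j = 0 then 0 else lcp l (l.drop j)) := by
      have := list_eq_map_range st.1 (fun j => if j = 0 then 0 else lcp l (l.drop j))
        (by
          intro j hj
          show st.1.getD j 0 = if j = 0 then 0 else lcp l (List.drop j l)
          by_cases hj0 : j = 0
          · rw [if_pos hj0]
            exact hz0 j (Or.inl hj0)
          · rw [if_neg hj0]
            exact hz j (by omega) (by omega))
      rw [hlen] at this
      exact this
    rw [foldl_add_nat, hzform]
    simp only [Nat.zero_add]
    -- peel off index 0 on both sides
    have hrange : ∀ m : Nat, 0 < m → List.range m = 0 :: List.range' 1 (m - 1) := by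
      intro m hm
      cases m with
      | zero => omega
      | succ k => rw [List.range_eq_range', List.range'_succ]; simp
    rw [hrange n hpos]
    simp only [List.map_cons, List.sum_cons]
    rw [if_pos trivial]
    have hcongr : (List.range' 1 (n - 1)).map (fun j => if j = 0 then 0 else lcp l (l.drop j))
        = (List.range' 1 (n - 1)).map (fun j => lcp l (l.drop j)) := by
      apply List.map_congr_left
      intro j hj
      have : 1 ≤ j := (List.mem_range'_1.mp hj).1
      rw [if_neg (by omega)]
    rw [hcongr]
    have : lcp l (l.drop 0) = n := by simp [lcp_self, hndef]
    rw [this]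
    congr 1
    omega
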